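-- pv_equiv track=rewrite | github.com/AdamZhouSE/pythonHomework | Code/CodeRecords/2203/60782/253648.py | check_whether_mysterious
-- ===== SOURCE A (Python) =====
-- def check_whether_mysterious(position_i, position_j, current_fix):
--     contribution = 0
--     for leng in range(position_j - position_i, len(current_fix)):
--         if ((1 <= position_i < position_j <= position_i + leng - 1 < position_j + leng -1 <= len(current_fix))
--                 and (current_fix[position_i - 1:position_i + leng - 1] == current_fix[position_j - 1:position_j + leng - 1])):
--             contribution = contribution + leng
--             contribution = contribution % (10 ** 9 + 7)
--     return contribution
-- ===== SOURCE B (Python) =====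
-- def check_whether_mysterious(position_i, position_j, current_fix):
--     # O(n): one longest-common-prefix scan, then a closed-form arithmetic-series sum.
--     M = 10 ** 9 + 7
--     n = len(current_fix)
--     i, j = position_i, position_j
--     if not (1 <= i < j):
--         return 0
--     lcp = 0
--     while j - 1 + lcp < n and current_fix[i - 1 + lcp] == current_fix[j - 1 + lcp]:
--         lcp += 1
--     lo = j - i + 1
--     hi = min(lcp, n - j + 1, n - 1)
--     if hi < lo:
--         return 0
--     return ((lo + hi) * (hi - lo + 1) // 2) % M
-- ===== Notes on version B (the rewrite author's own statement) =====
-- stated objective: faster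
-- what changed: Instead of comparing a pair of length-leng substrings for every candidate length (A's quadratic scan), B computes the longest common prefix of the two suffixes once in a single linear scan and sums the admissible lengths with a closed-form arithmetic-series formula.
import Mathlib
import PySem

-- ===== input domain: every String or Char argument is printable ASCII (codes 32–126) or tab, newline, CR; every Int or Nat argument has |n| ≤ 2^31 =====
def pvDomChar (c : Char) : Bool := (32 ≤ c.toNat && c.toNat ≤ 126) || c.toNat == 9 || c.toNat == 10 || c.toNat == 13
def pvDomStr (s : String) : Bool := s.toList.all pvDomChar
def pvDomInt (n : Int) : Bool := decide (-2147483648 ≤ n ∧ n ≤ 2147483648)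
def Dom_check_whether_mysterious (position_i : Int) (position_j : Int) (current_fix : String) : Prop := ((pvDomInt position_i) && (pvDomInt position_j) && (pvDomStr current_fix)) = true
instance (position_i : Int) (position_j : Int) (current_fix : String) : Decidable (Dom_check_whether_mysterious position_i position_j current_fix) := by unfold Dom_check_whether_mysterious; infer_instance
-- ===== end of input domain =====

-- B replaces A's quadratic scan over all lengths by one longest-common-prefix scan plus a
-- closed-form arithmetic-series sum (objective: faster).


-- ===== PORT A =====
def check_whether_mysterious (position_i : Int) (position_j : Int) (current_fix : String) : Int :=
  (PySem.List.pyRange (position_j - position_i) (PySem.Str.len current_fix)).foldl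
    (fun contribution leng =>
      if (1 ≤ position_i ∧ position_i < position_j ∧ position_j ≤ position_i + leng - 1 ∧
            position_i + leng - 1 < position_j + leng - 1 ∧
            position_j + leng - 1 ≤ PySem.Str.len current_fix) ∧
          PySem.Str.slice current_fix (some (position_i - 1)) (some (position_i + leng - 1)) =
            PySem.Str.slice current_fix (some (position_j - 1)) (some (position_j + leng - 1)) then
        PySem.Int.mod (contribution + leng) (10 ^ 9 + 7)
      else contribution) 0

-- ===== PORT B =====
-- B's while-loop computing the longest common prefix of the suffixes at 0-based positions a
-- and b, written with the explicit fuel `cs.length - b` that the loop condition bounds it by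
-- (structural recursion; the recursion stops on the same condition as B's while).  Python
-- indexes with plain s[...]; on every state B's loop actually reaches the indices are in
-- range (a < b < length), so `getD` is exact there.
def lcpGo (cs : List Char) (a b : Nat) : Nat → Nat
  | 0 => 0
  | fuel + 1 =>
    if b < cs.length ∧ cs.getD a ' ' = cs.getD b ' ' then lcpGo cs (a + 1) (b + 1) fuel + 1
    else 0

def lcpAux (cs : List Char) (a b : Nat) : Nat := lcpGo cs a b (cs.length - b)

-- (Source B's locals M, n, lcp, lo, hi are written inline here.)
def check_whether_mysterious_alt (position_i : Int) (position_j : Int) (current_fix : String) : Int :=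
  if 1 ≤ position_i ∧ position_i < position_j then
    if min (min (lcpAux current_fix.toList (position_i - 1).toNat (position_j - 1).toNat : Int)
              (PySem.Str.len current_fix - position_j + 1)) (PySem.Str.len current_fix - 1)
        < position_j - position_i + 1 then 0
    else
      PySem.Int.mod
        (PySem.Int.floordiv
          (((position_j - position_i + 1) +
              min (min (lcpAux current_fix.toList (position_i - 1).toNat (position_j - 1).toNat : Int)
                (PySem.Str.len current_fix - position_j + 1)) (PySem.Str.len current_fix - 1)) *
            (min (min (lcpAux current_fix.toList (position_i - 1).toNat (position_j - 1).toNat : Int)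
                (PySem.Str.len current_fix - position_j + 1)) (PySem.Str.len current_fix - 1) -
              (position_j - position_i + 1) + 1)) 2)
        (10 ^ 9 + 7)
  else 0

-- ===== PRECONDITION & SPEC =====
def Spec_check_whether_mysterious (position_i : Int) (position_j : Int) (current_fix : String) (out : Int) : Prop := out = check_whether_mysterious_alt position_i position_j current_fix
instance (position_i : Int) (position_j : Int) (current_fix : String) (out : Int) : Decidable (Spec_check_whether_mysterious position_i position_j current_fix out) := by unfold Spec_check_whether_mysterious; infer_instance

-- ===== CLAIM (what is proved, stated in full; the proofs are below) =====
def Claim_equal_check_whether_mysterious : Prop := ∀ (position_i : Int) (position_j : Int) (current_fix : String), Dom_check_whether_mysterious position_i position_j current_fix → Spec_check_whether_mysterious position_i position_j current_fix (check_whether_mysterious position_i position_j current_fix)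

-- ===== LEMMAS AND PROOFS =====

-- A's fold accumulates (… + leng) % M; since M > 0 the running value stays in [0, M), so the
-- fold equals (sum of the selected lengths) % M.
theorem foldl_mod_filter (i j : Int) (s : String) :
    ∀ (l : List Int) (c : Int), 0 ≤ c → c < 10 ^ 9 + 7 →
      l.foldl (fun contribution leng =>
          if (1 ≤ i ∧ i < j ∧ j ≤ i + leng - 1 ∧ i + leng - 1 < j + leng - 1 ∧
                j + leng - 1 ≤ PySem.Str.len s) ∧
              PySem.Str.slice s (some (i - 1)) (some (i + leng - 1)) =
                PySem.Str.slice s (some (j - 1)) (some (j + leng - 1)) then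
            PySem.Int.mod (contribution + leng) (10 ^ 9 + 7)
          else contribution) c
        = (c + (l.filter (fun x => decide ((1 ≤ i ∧ i < j ∧ j ≤ i + x - 1 ∧ i + x - 1 < j + x - 1 ∧ j + x - 1 ≤ PySem.Str.len s) ∧ PySem.Str.slice s (some (i - 1)) (some (i + x - 1)) = PySem.Str.slice s (some (j - 1)) (some (j + x - 1))))).sum) % (10 ^ 9 + 7) := by
  intro l
  induction l with
  | nil =>
    intro c h1 h2
    simpa using (Int.emod_eq_of_lt h1 h2).symm
  | cons x xs ih =>
    intro c h1 h2
    simp only [List.foldl_cons, List.filter_cons]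
    by_cases hP : (1 ≤ i ∧ i < j ∧ j ≤ i + x - 1 ∧ i + x - 1 < j + x - 1 ∧ j + x - 1 ≤ PySem.Str.len s) ∧ PySem.Str.slice s (some (i - 1)) (some (i + x - 1)) = PySem.Str.slice s (some (j - 1)) (some (j + x - 1))
    · have hd : decide ((1 ≤ i ∧ i < j ∧ j ≤ i + x - 1 ∧ i + x - 1 < j + x - 1 ∧ j + x - 1 ≤ PySem.Str.len s) ∧ PySem.Str.slice s (some (i - 1)) (some (i + x - 1)) = PySem.Str.slice s (some (j - 1)) (some (j + x - 1))) = true := decide_eq_true hP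
      rw [if_pos hP, PySem.Int.mod_eq_emod_of_pos (show (0:Int) < 10 ^ 9 + 7 by norm_num)]
      rw [ih _ (Int.emod_nonneg _ (by norm_num)) (Int.emod_lt_of_pos _ (by norm_num))]
      rw [if_pos hd, List.sum_cons, Int.emod_add_emod, ← add_assoc]
    · have hd : ¬ (decide ((1 ≤ i ∧ i < j ∧ j ≤ i + x - 1 ∧ i + x - 1 < j + x - 1 ∧ j + x - 1 ≤ PySem.Str.len s) ∧ PySem.Str.slice s (some (i - 1)) (some (i + x - 1)) = PySem.Str.slice s (some (j - 1)) (some (j + x - 1))) = true) := by simpa using hP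
      rw [if_neg hP, ih c h1 h2, if_neg hd]

-- With enough fuel, lcpGo characterises equality of take-L prefixes of the two suffixes.
theorem lcp_iff (cs : List Char) :
    ∀ (L p q fuel : Nat), p ≤ q → q + L ≤ cs.length → cs.length ≤ q + fuel →
      (List.take L (List.drop p cs) = List.take L (List.drop q cs) ↔ L ≤ lcpGo cs p q fuel) := by
  intro L
  induction L with
  | zero => intro p q fuel _ _ _; simp
  | succ L ih =>
    intro p q fuel hpq hlen hfuel
    have hq : q < cs.length := by omega
    have hp : p < cs.length := by omega
    obtain ⟨f, rfl⟩ : ∃ f, fuel = f + 1 := ⟨fuel - 1, by omega⟩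
    rw [List.drop_eq_getElem_cons hp, List.drop_eq_getElem_cons hq,
        List.take_succ_cons, List.take_succ_cons]
    rw [lcpGo]
    by_cases hc : q < cs.length ∧ cs.getD p ' ' = cs.getD q ' '
    · have heq : cs[p] = cs[q] := by
        have := hc.2
        rwa [List.getD_eq_getElem cs ' ' hp, List.getD_eq_getElem cs ' ' hq] at this
      rw [if_pos hc]
      constructor
      · intro h
        have ht : List.take L (List.drop (p+1) cs) = List.take L (List.drop (q+1) cs) :=
          (List.cons.injEq _ _ _ _).mp h |>.2
        have := (ih (p+1) (q+1) f (by omega) (by omega) (by omega)).mp ht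
        omega
      · intro h
        have ht := (ih (p+1) (q+1) f (by omega) (by omega) (by omega)).mpr (by omega)
        rw [heq, ht]
    · rw [if_neg hc]
      have hne : cs[p] ≠ cs[q] := by
        intro h
        apply hc
        refine ⟨hq, ?_⟩
        rw [List.getD_eq_getElem cs ' ' hp, List.getD_eq_getElem cs ' ' hq]
        exact h
      constructor
      · intro h
        exact absurd ((List.cons.injEq _ _ _ _).mp h).1 hne
      · omega

-- The loop-body condition, on inputs with 1 ≤ i < j, is exactly an interval condition on leng.
theorem acond_iff (i j : Int) (s : String) (hC : 1 ≤ i ∧ i < j) (leng : Int) :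
    (((1 ≤ i ∧ i < j ∧ j ≤ i + leng - 1 ∧ i + leng - 1 < j + leng - 1 ∧ j + leng - 1 ≤ PySem.Str.len s) ∧ PySem.Str.slice s (some (i - 1)) (some (i + leng - 1)) = PySem.Str.slice s (some (j - 1)) (some (j + leng - 1))) ↔
      (j - i + 1 ≤ leng ∧
       leng ≤ min ((lcpAux s.toList (i - 1).toNat (j - 1).toNat : Int))
                  ((PySem.Str.len s) - j + 1))) := by
  have hn : PySem.Str.len s = (s.toList.length : Int) := rfl
  unfold lcpAux
  constructor
  · rintro ⟨hnum, hslice⟩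
    have hlo : j - i + 1 ≤ leng := by omega
    have hub : leng ≤ (s.toList.length : Int) - j + 1 := by rw [hn] at hnum; omega
    refine ⟨hlo, ?_⟩
    have hsl : List.take leng.toNat (List.drop (i-1).toNat s.toList)
             = List.take leng.toNat (List.drop (j-1).toNat s.toList) := by
      have e1 := PySem.List.slice_toNat s.toList (a := i - 1) (b := i + leng - 1)
        (by omega) (by omega)
      have e2 := PySem.List.slice_toNat s.toList (a := j - 1) (b := j + leng - 1)
        (by omega) (by omega)
      have h' := congrArg String.toList hslice
      simp only [PySem.Str.slice, PySem.Chars.slice, String.toList_ofList] at h'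
      rw [e1, e2] at h'
      have t1 : (i + leng - 1).toNat - (i - 1).toNat = leng.toNat := by omega
      have t2 : (j + leng - 1).toNat - (j - 1).toNat = leng.toNat := by omega
      rwa [t1, t2] at h'
    have := (lcp_iff s.toList leng.toNat (i-1).toNat (j-1).toNat
      (s.toList.length - (j-1).toNat) (by omega) (by omega) (by omega)).mp hsl
    rw [hn]
    omega
  · rintro ⟨hlo, hhi⟩
    have hub : leng ≤ (s.toList.length : Int) - j + 1 := by rw [hn] at hhi; omega
    have hlcp : leng.toNat ≤ lcpGo s.toList (i-1).toNat (j-1).toNat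
        (s.toList.length - (j-1).toNat) := by omega
    have hsl := (lcp_iff s.toList leng.toNat (i-1).toNat (j-1).toNat
      (s.toList.length - (j-1).toNat) (by omega) (by omega) (by omega)).mpr hlcp
    refine ⟨by rw [hn]; omega, ?_⟩
    show PySem.Str.slice _ _ _ = PySem.Str.slice _ _ _
    simp only [PySem.Str.slice, PySem.Chars.slice]
    congr 1
    rw [PySem.List.slice_toNat s.toList (a := i - 1) (b := i + leng - 1) (by omega) (by omega),
        PySem.List.slice_toNat s.toList (a := j - 1) (b := j + leng - 1) (by omega) (by omega)]
    have t1 : (i + leng - 1).toNat - (i - 1).toNat = leng.toNat := by omega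
    have t2 : (j + leng - 1).toNat - (j - 1).toNat = leng.toNat := by omega
    rw [t1, t2, hsl]

-- Filtering an interval condition out of a range gives a range.
theorem filter_pyRange (k : Nat) :
    ∀ (a b lo hi : Int), (b - a).toNat = k → a ≤ lo → hi < b →
      (PySem.List.pyRange a b).filter (fun x => decide (lo ≤ x ∧ x ≤ hi))
        = PySem.List.pyRange lo (hi + 1) := by
  induction k with
  | zero =>
    intro a b lo hi hk hlo hhi
    rw [PySem.List.pyRange_one_eq_nil (by omega), PySem.List.pyRange_one_eq_nil (by omega)]
    simp
  | succ k ih =>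
    intro a b lo hi hk hlo hhi
    have hab : a < b := by omega
    rw [PySem.List.pyRange_one_cons hab, List.filter_cons]
    by_cases hax : lo ≤ a ∧ a ≤ hi
    · have hla : lo = a := le_antisymm hax.1 hlo
      have hcongr : (PySem.List.pyRange (a+1) b).filter (fun x => decide (lo ≤ x ∧ x ≤ hi))
          = (PySem.List.pyRange (a+1) b).filter (fun x => decide (a + 1 ≤ x ∧ x ≤ hi)) := by
        apply List.filter_congr
        intro x hx
        have := PySem.List.mem_pyRange_one.mp hx
        simp only [decide_eq_decide]
        omega
      rw [hcongr]
      simp only [hax, and_self, decide_true, if_true]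
      rw [ih (a+1) b (a+1) hi (by omega) (by omega) hhi, hla]
      rw [← PySem.List.pyRange_one_cons (show a < hi + 1 by omega)]
    · by_cases halo : a < lo
      · simp only [decide_eq_true_eq, if_neg (by omega : ¬ (lo ≤ a ∧ a ≤ hi))]
        exact ih (a+1) b lo hi (by omega) (by omega) hhi
      · -- a = lo and hi < a : both sides empty
        have hha : hi < a := by omega
        simp only [decide_eq_true_eq, if_neg (by omega : ¬ (lo ≤ a ∧ a ≤ hi))]
        rw [PySem.List.pyRange_one_eq_nil (by omega : hi + 1 ≤ lo)]
        rw [List.filter_eq_nil_iff]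
        intro x hx
        have := PySem.List.mem_pyRange_one.mp hx
        simp only [decide_eq_true_eq]
        omega

-- Twice the sum of a unit-step range, in closed form.
theorem two_mul_sum_pyRange (k : Nat) :
    ∀ (a b : Int), (b - a).toNat = k → a ≤ b →
      2 * (PySem.List.pyRange a b).sum = (a + b - 1) * (b - a) := by
  induction k with
  | zero =>
    intro a b hk hab
    have hba : b = a := by omega
    rw [PySem.List.pyRange_one_eq_nil (by omega)]
    subst hba
    ring_nf
    simp
  | succ k ih =>
    intro a b hk _
    rw [PySem.List.pyRange_one_cons (by omega), List.sum_cons]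
    have h := ih (a+1) b (by omega) (by omega)
    linear_combination h

-- ===== VERDICT (by name: the statement is the Claim_ definition above) =====
theorem check_whether_mysterious_spec : Claim_equal_check_whether_mysterious := by
  intro i j s _
  unfold Spec_check_whether_mysterious check_whether_mysterious check_whether_mysterious_alt
  rw [foldl_mod_filter i j s _ 0 (le_refl 0) (by norm_num)]
  by_cases hC : 1 ≤ i ∧ i < j
  · rw [if_pos hC]
    set n : Int := PySem.Str.len s with hn
    set lcp : Int := (lcpAux s.toList (i - 1).toNat (j - 1).toNat : Int) with hlcp
    set lo : Int := j - i + 1 with hlo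
    have hn0 : 0 ≤ n := by
      rw [hn]; change (0:Int) ≤ (s.toList.length : Int); exact Int.natCast_nonneg _
    have hj2 : 2 ≤ j := by omega
    have hhieq : min (min lcp (n - j + 1)) (n - 1) = min lcp (n - j + 1) := by omega
    rw [hhieq]
    set hi : Int := min lcp (n - j + 1) with hhi
    have hcongr : (PySem.List.pyRange (j - i) n).filter (fun x => decide ((1 ≤ i ∧ i < j ∧ j ≤ i + x - 1 ∧ i + x - 1 < j + x - 1 ∧ j + x - 1 ≤ PySem.Str.len s) ∧ PySem.Str.slice s (some (i - 1)) (some (i + x - 1)) = PySem.Str.slice s (some (j - 1)) (some (j + x - 1))))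
        = (PySem.List.pyRange (j - i) n).filter (fun x => decide (lo ≤ x ∧ x ≤ hi)) := by
      apply List.filter_congr
      intro x _
      simp only [decide_eq_decide]
      exact acond_iff i j s hC x
    rw [hcongr, filter_pyRange (n - (j - i)).toNat (j - i) n lo hi rfl (by omega) (by omega)]
    by_cases hempty : hi < lo
    · rw [if_pos hempty, PySem.List.pyRange_one_eq_nil (by omega)]
      simp
    · rw [if_neg hempty]
      have hsum := two_mul_sum_pyRange ((hi + 1) - lo).toNat lo (hi + 1) rfl (by omega)
      rw [PySem.Int.mod_eq_emod_of_pos (by norm_num),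
          PySem.Int.floordiv_eq_ediv_of_pos (by norm_num)]
      have hprod : (lo + hi) * (hi - lo + 1) = 2 * (PySem.List.pyRange lo (hi + 1)).sum := by
        linear_combination -hsum
      rw [hprod, Int.mul_ediv_cancel_left _ (by norm_num)]
      norm_num
  · rw [if_neg hC]
    have : (PySem.List.pyRange (j - i) (PySem.Str.len s)).filter
        (fun x => decide ((1 ≤ i ∧ i < j ∧ j ≤ i + x - 1 ∧ i + x - 1 < j + x - 1 ∧ j + x - 1 ≤ PySem.Str.len s) ∧ PySem.Str.slice s (some (i - 1)) (some (i + x - 1)) = PySem.Str.slice s (some (j - 1)) (some (j + x - 1)))) = [] := by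
      rw [List.filter_eq_nil_iff]
      intro x _
      simp only [decide_eq_true_eq]
      intro hA
      exact hC ⟨hA.1.1, hA.1.2.1⟩
    rw [this]
    simp
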